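-- pv_equiv track=rewrite | github.com/TsygankovMax/gitleads | contact_lookup.py | _filter_technical_roles
-- ===== SOURCE A (Python) =====
-- NON_TECH_TITLE_KEYWORDS = [
--     "gtm", "go to market", "go-to-market", "sales", "revenue", "rev ops",
--     "marketing", "growth", "demand gen", "brand",
--     "customer success", "customer experience", "support",
--     "people ops",
--     "strategy", "business development", "biz dev", "bd ",
--     "finance", "controller", "accounting",
--     "legal", "compliance", "counsel",
--     "human resources", "people", "talent", "recruiting",
--     "community", "dao", "ecosystem", "social",
--     "research analyst", "investment", "venture",
--     "head of solutions",
-- ]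
--
-- def _filter_technical_roles(people: list[dict]) -> list[dict]:
--     out = []
--     for p in people:
--         title = (p.get("title", "") or "").lower()
--         if any(kw in title for kw in NON_TECH_TITLE_KEYWORDS):
--             continue
--         out.append(p)
--     return out
-- ===== SOURCE B (Python) =====
-- NON_TECH_TITLE_KEYWORDS = [
--     "gtm", "go to market", "go-to-market", "sales", "revenue", "rev ops",
--     "marketing", "growth", "demand gen", "brand",
--     "customer success", "customer experience", "support",
--     "people ops",
--     "strategy", "business development", "biz dev", "bd ",
--     "finance", "controller", "accounting",
--     "legal", "compliance", "counsel",
--     "human resources", "people", "talent", "recruiting",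
--     "community", "dao", "ecosystem", "social",
--     "research analyst", "investment", "venture",
--     "head of solutions",
-- ]
--
--
-- def _is_technical(p: dict) -> bool:
--     title = (p.get("title", "") or "").lower()
--     return all(kw not in title for kw in NON_TECH_TITLE_KEYWORDS)
--
--
-- def _filter_technical_roles(people: list[dict]) -> list[dict]:
--     if not people:
--         return []
--     head, rest = people[0], people[1:]
--     tail = _filter_technical_roles(rest)
--     return [head] + tail if _is_technical(head) else tail
-- ===== Notes on version B (the rewrite author's own statement) =====
-- stated objective: alternative
-- what changed: Replaces the accumulator loop with continue/append by structural recursion that builds the output front-to-back from a recursive call on the tail, and replaces the any(kw in title) rejection test by a standalone all(kw not in title) keep-predicate.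
import Mathlib
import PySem

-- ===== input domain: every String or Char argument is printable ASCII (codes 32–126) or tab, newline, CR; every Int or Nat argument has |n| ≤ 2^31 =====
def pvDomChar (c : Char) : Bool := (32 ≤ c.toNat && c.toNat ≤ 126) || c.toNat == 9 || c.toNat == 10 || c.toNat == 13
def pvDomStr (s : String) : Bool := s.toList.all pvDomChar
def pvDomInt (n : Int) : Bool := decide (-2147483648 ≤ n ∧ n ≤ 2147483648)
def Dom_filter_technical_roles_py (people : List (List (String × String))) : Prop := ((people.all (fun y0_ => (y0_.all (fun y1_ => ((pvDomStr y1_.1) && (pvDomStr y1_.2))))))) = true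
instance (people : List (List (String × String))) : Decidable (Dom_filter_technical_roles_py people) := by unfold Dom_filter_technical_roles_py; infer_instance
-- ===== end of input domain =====

-- B replaces the accumulator loop (continue/append) by structural recursion building the output
-- front-to-back, with a standalone all(kw not in title) keep-predicate (alternative, not faster).

def pvKeywords : List String := [
    "gtm", "go to market", "go-to-market", "sales", "revenue", "rev ops",
    "marketing", "growth", "demand gen", "brand",
    "customer success", "customer experience", "support",
    "people ops",
    "strategy", "business development", "biz dev", "bd ",
    "finance", "controller", "accounting",
    "legal", "compliance", "counsel",
    "human resources", "people", "talent", "recruiting",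
    "community", "dao", "ecosystem", "social",
    "research analyst", "investment", "venture",
    "head of solutions"]

-- ===== PORT A =====
-- title = (p.get("title", "") or "").lower(); 'x or ""' on a str is x unless x == "".
def filter_technical_roles_py (people : List (List (String × String))) : List (List (String × String)) :=
  people.foldl (fun out p =>
    let traw := (PySem.Dict.mk p).getD "title" ""
    let title := PySem.Str.lower (if traw == "" then "" else traw)
    if pvKeywords.any (fun kw => PySem.Str.isIn kw title) then out
    else out ++ [p]) []

-- ===== PORT B =====
def pvIsTechnical (p : List (String × String)) : Bool :=
  let traw := (PySem.Dict.mk p).getD "title" ""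
  let title := PySem.Str.lower (if traw == "" then "" else traw)
  pvKeywords.all (fun kw => !(PySem.Str.isIn kw title))

def filter_technical_roles_py_alt : List (List (String × String)) → List (List (String × String))
  | [] => []
  | head :: rest =>
    let tail := filter_technical_roles_py_alt rest
    if pvIsTechnical head then [head] ++ tail else tail

-- ===== PRECONDITION & SPEC =====
def Spec_filter_technical_roles_py (people : List (List (String × String))) (out : List (List (String × String))) : Prop := out = filter_technical_roles_py_alt people
instance (people : List (List (String × String))) (out : List (List (String × String))) : Decidable (Spec_filter_technical_roles_py people out) := by unfold Spec_filter_technical_roles_py; infer_instance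

-- ===== CLAIM (what is proved, stated in full; the proofs are below) =====
def Claim_equal_filter_technical_roles_py : Prop := ∀ (people : List (List (String × String))), Dom_filter_technical_roles_py people → Spec_filter_technical_roles_py people (filter_technical_roles_py people)

-- ===== LEMMAS AND PROOFS =====

-- A's skip-loop is a filter on the negated rejection test, which is B's keep-predicate
lemma foldl_skip_eq_filter {α : Type} (c : α → Bool) (l : List α) :
    l.foldl (fun out x => if c x then out else out ++ [x]) [] = l.filter (fun x => !c x) := by
  have h : l.foldl (fun out x => if c x then out else out ++ [x]) []
      = l.foldl (fun out x => if !c x then out ++ [x] else out) [] := by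
    apply PySem.List.foldl_congr_mem
    intro acc x _
    cases c x <;> simp
  rw [h]
  simpa using PySem.List.foldl_append_if_eq_filter (fun x => !c x) l []

-- B's front-to-back recursion is the same filter
lemma alt_eq_filter (l : List (List (String × String))) :
    filter_technical_roles_py_alt l = l.filter pvIsTechnical := by
  induction l with
  | nil => rfl
  | cons h t ih =>
    simp only [filter_technical_roles_py_alt, ih, List.filter_cons]
    cases hc : pvIsTechnical h <;> simp [hc]

-- all(kw not in title) = not any(kw in title)
lemma all_not_eq_not_any (title : String) :
    pvKeywords.all (fun kw => !(PySem.Str.isIn kw title))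
      = !(pvKeywords.any (fun kw => PySem.Str.isIn kw title)) := by
  simp [List.all_eq_not_any_not]

-- ===== VERDICT (by name: the statement is the Claim_ definition above) =====
theorem filter_technical_roles_py_spec : Claim_equal_filter_technical_roles_py := by
  intro people _
  show filter_technical_roles_py people = filter_technical_roles_py_alt people
  rw [alt_eq_filter]
  unfold filter_technical_roles_py
  rw [foldl_skip_eq_filter]
  apply List.filter_congr
  intro p _
  simp only [pvIsTechnical, all_not_eq_not_any]
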